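-- pv_equiv track=rewrite | github.com/vsaxena33/DSA | Data Structures/Week 3/common_substring.py | get_all_hashes
-- ===== SOURCE A (Python) =====
-- MOD1 = 10**9 + 7
--
-- MOD2 = 10**9 + 9
--
-- BASE1 = 911
--
-- BASE2 = 3571
--
-- def precompute_hashes(s, base, mod):
--     n = len(s)
--     prefix_hash = [0] * (n + 1)
--     power = [1] * (n + 1)
--
--     for i in range(n):
--         prefix_hash[i+1] = (prefix_hash[i] * base + ord(s[i])) % mod
--         power[i+1] = (power[i] * base) % mod
--
--     return prefix_hash, power
--
-- def get_substring_hash(h, power, l, r, mod):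
--     # Get hash of s[l:r]
--     return (h[r] - h[l] * power[r - l] % mod + mod) % mod
--
-- def get_all_hashes(s, length):
--     if length == 0:
--         return {}
--
--     h1, p1 = precompute_hashes(s, BASE1, MOD1)
--     h2, p2 = precompute_hashes(s, BASE2, MOD2)
--
--     hashes = {}
--     for i in range(len(s) - length + 1):
--         hash1 = get_substring_hash(h1, p1, i, i + length, MOD1)
--         hash2 = get_substring_hash(h2, p2, i, i + length, MOD2)
--         key = (hash1, hash2)
--         # Keep the smallest i if multiple collide
--         if key not in hashes or i < hashes[key]:
--             hashes[key] = i
--     return hashes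
-- ===== SOURCE B (Python) =====
-- MOD1 = 10**9 + 7
-- MOD2 = 10**9 + 9
-- BASE1 = 911
-- BASE2 = 3571
--
-- def get_all_hashes(s, length):
--     n = len(s)
--     if length <= 0 or length > n:
--         return {}
--     top1 = pow(BASE1, length - 1, MOD1)
--     top2 = pow(BASE2, length - 1, MOD2)
--     h1 = 0
--     h2 = 0
--     for c in s[:length]:
--         h1 = (h1 * BASE1 + ord(c)) % MOD1
--         h2 = (h2 * BASE2 + ord(c)) % MOD2
--     hashes = {(h1, h2): 0}
--     for i in range(1, n - length + 1):
--         h1 = ((h1 - ord(s[i - 1]) * top1) * BASE1 + ord(s[i + length - 1])) % MOD1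
--         h2 = ((h2 - ord(s[i - 1]) * top2) * BASE2 + ord(s[i + length - 1])) % MOD2
--         key = (h1, h2)
--         if key not in hashes:
--             hashes[key] = i
--     return hashes
-- ===== Notes on version B (the rewrite author's own statement) =====
-- stated objective: alternative
-- what changed: Replaced A's precomputed prefix-hash and power tables (plus per-window hash recombination via get_substring_hash) with a Rabin-Karp rolling hash that keeps only the two current window hash values and updates them incrementally, inserting a key only when absent (A's 'i < hashes[key]' clause can never fire since i is increasing).
import Mathlib
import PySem

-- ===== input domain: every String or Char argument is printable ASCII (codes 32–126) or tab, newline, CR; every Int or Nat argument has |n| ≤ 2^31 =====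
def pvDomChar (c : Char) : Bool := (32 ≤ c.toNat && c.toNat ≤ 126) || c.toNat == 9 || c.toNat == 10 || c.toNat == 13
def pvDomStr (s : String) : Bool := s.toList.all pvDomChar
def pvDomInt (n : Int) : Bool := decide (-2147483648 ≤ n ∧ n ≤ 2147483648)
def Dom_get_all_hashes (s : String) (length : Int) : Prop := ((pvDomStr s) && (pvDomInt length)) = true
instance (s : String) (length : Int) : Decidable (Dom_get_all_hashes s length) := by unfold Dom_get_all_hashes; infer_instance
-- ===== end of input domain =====

-- B replaces A's prefix-hash/power tables with a Rabin–Karp rolling hash that keeps only the two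
-- current window hashes (objective: alternative; a timing run measured B faster by a constant factor).

-- ===== PORT A =====
-- precompute_hashes: the Python fills prefix_hash[i+1]/power[i+1] from slot i in order; the fold
-- appends each newly filled slot, reading slot i as the last element (same values, same order).
def precompute_hashes (s : String) (base mod : Int) : List Int × List Int :=
  s.toList.foldl
    (fun (pr : List Int × List Int) c =>
      (pr.1 ++ [PySem.Int.mod (pr.1.getLastD 0 * base + (c.toNat : Int)) mod],
       pr.2 ++ [PySem.Int.mod (pr.2.getLastD 1 * base) mod]))
    ([0], [1])

def get_substring_hash (h power : List Int) (l r mod : Int) : Int :=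
  PySem.Int.mod (PySem.List.pyGetD h r 0 -
    PySem.Int.mod (PySem.List.pyGetD h l 0 * PySem.List.pyGetD power (r - l) 0) mod + mod) mod

def get_all_hashes (s : String) (length : Int) : List (Int × Int × Int) :=
  if length == 0 then []
  else
    let hp1 := precompute_hashes s 911 1000000007
    let hp2 := precompute_hashes s 3571 1000000009
    let hashes := (PySem.List.pyRange 0 ((s.toList.length : Int) - length + 1) 1).foldl
      (fun (d : PySem.Dict (Int × Int) Int) i =>
        let hash1 := get_substring_hash hp1.1 hp1.2 i (i + length) 1000000007
        let hash2 := get_substring_hash hp2.1 hp2.2 i (i + length) 1000000009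
        let key := (hash1, hash2)
        match d.get? key with
        | none => d.insert key i
        | some v => if i < v then d.insert key i else d)
      PySem.Dict.empty
    hashes.items.map (fun p => (p.1.1, p.1.2, p.2))

-- ===== PORT B =====
def pvFirstHash (cs : List Char) (base mod : Int) : Int :=
  cs.foldl (fun a c => PySem.Int.mod (a * base + (c.toNat : Int)) mod) 0

def get_all_hashes_alt (s : String) (length : Int) : List (Int × Int × Int) :=
  let cs := s.toList
  let n : Int := (cs.length : Int)
  if length ≤ 0 || n < length then []
  else
    let top1 := PySem.Int.powMod 911 (length - 1).toNat 1000000007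
    let top2 := PySem.Int.powMod 3571 (length - 1).toNat 1000000009
    let h1 := pvFirstHash (PySem.List.slice cs none (some length)) 911 1000000007
    let h2 := pvFirstHash (PySem.List.slice cs none (some length)) 3571 1000000009
    let st := (PySem.List.pyRange 1 (n - length + 1) 1).foldl
      (fun (st : Int × Int × PySem.Dict (Int × Int) Int) i =>
        let h1 := PySem.Int.mod ((st.1 - ((PySem.List.pyGetD cs (i - 1) ' ').toNat : Int) * top1) * 911 +
          ((PySem.List.pyGetD cs (i + length - 1) ' ').toNat : Int)) 1000000007
        let h2 := PySem.Int.mod ((st.2.1 - ((PySem.List.pyGetD cs (i - 1) ' ').toNat : Int) * top2) * 3571 +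
          ((PySem.List.pyGetD cs (i + length - 1) ' ').toNat : Int)) 1000000009
        let key := (h1, h2)
        if (st.2.2.get? key).isSome then (h1, h2, st.2.2) else (h1, h2, st.2.2.insert key i))
      (h1, h2, PySem.Dict.empty.insert (h1, h2) 0)
    st.2.2.items.map (fun p => (p.1.1, p.1.2, p.2))

-- ===== PRECONDITION & SPEC =====
-- Pre_ excludes negative length, on which A always raises IndexError (prefix_hash is indexed past its end).
def Pre_get_all_hashes (s : String) (length : Int) : Prop := 0 ≤ length
instance (s : String) (length : Int) : Decidable (Pre_get_all_hashes s length) := by unfold Pre_get_all_hashes; infer_instance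
def pvWitness_get_all_hashes : String × Int := ("ab", 1)

def Spec_get_all_hashes (s : String) (length : Int) (out : List (Int × Int × Int)) : Prop := out = get_all_hashes_alt s length
instance (s : String) (length : Int) (out : List (Int × Int × Int)) : Decidable (Spec_get_all_hashes s length out) := by unfold Spec_get_all_hashes; infer_instance

-- ===== CLAIM (what is proved, stated in full; the proofs are below) =====
def Claim_equal_get_all_hashes : Prop := ∀ (s : String) (length : Int), Dom_get_all_hashes s length → Pre_get_all_hashes s length → Spec_get_all_hashes s length (get_all_hashes s length)
-- ===== LEMMAS AND PROOFS =====

def pvRawH (b : Int) (l : List Char) : Int := l.foldl (fun a c => a * b + (c.toNat : Int)) 0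

def pvWin (cs : List Char) (i L : Nat) : List Char := (cs.drop i).take L

def pvKey (cs : List Char) (L i : Nat) : Int × Int :=
  (pvRawH 911 (pvWin cs i L) % 1000000007, pvRawH 3571 (pvWin cs i L) % 1000000009)

def pvPH (cs : List Char) (b m : Int) : List Int :=
  (List.range (cs.length + 1)).map (fun i => pvRawH b (cs.take i) % m)

def pvPW (b m : Int) (n : Nat) : List Int :=
  (List.range (n + 1)).map (fun i => b ^ i % m)

-- fold with per-step mod = mod of plain fold

lemma pvFoldMod (b m : Int) (hm : 0 < m) (l : List Char) : ∀ (a : Int),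
    l.foldl (fun x c => PySem.Int.mod (x * b + (c.toNat : Int)) m) (a % m)
      = (l.foldl (fun x c => x * b + (c.toNat : Int)) a) % m := by
  induction l with
  | nil => intro a; simp
  | cons c t ih =>
    intro a
    simp only [List.foldl_cons]
    rw [PySem.Int.mod_eq_emod_of_pos (by omega)]
    have : (a % m * b + (c.toNat : Int)) % m = (a * b + (c.toNat : Int)) % m := by
      conv_rhs => rw [Int.add_emod, Int.mul_emod]
      rw [Int.add_emod, Int.mul_emod (a % m), Int.emod_emod_of_dvd _ dvd_rfl]
    rw [this, ← ih]

lemma pvRawH_shift (b : Int) (l : List Char) : ∀ (a : Int),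
    l.foldl (fun x c => x * b + (c.toNat : Int)) a = a * b ^ l.length + pvRawH b l := by
  induction l with
  | nil => intro a; simp [pvRawH]
  | cons c t ih =>
    intro a
    rw [List.foldl_cons, ih]
    have h2 : pvRawH b (c :: t) = ((0:Int) * b + (c.toNat : Int)) * b ^ t.length + pvRawH b t := by
      rw [pvRawH, List.foldl_cons, ih]
    rw [h2]
    simp only [List.length_cons]
    ring

lemma pvRawH_append (b : Int) (u v : List Char) :
    pvRawH b (u ++ v) = pvRawH b u * b ^ v.length + pvRawH b v := by
  unfold pvRawH
  rw [List.foldl_append, pvRawH_shift]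
  rfl

lemma pvRawH_cons (b : Int) (c : Char) (l : List Char) :
    pvRawH b (c :: l) = (c.toNat : Int) * b ^ l.length + pvRawH b l := by
  have := pvRawH_append b [c] l
  simpa [pvRawH] using this

lemma pvRawH_concat (b : Int) (l : List Char) (c : Char) :
    pvRawH b (l ++ [c]) = pvRawH b l * b + (c.toNat : Int) := by
  rw [pvRawH_append]; simp [pvRawH]

lemma pvEmodEmod (x m : Int) : x % m % m = x % m := Int.emod_emod_of_dvd _ dvd_rfl

lemma pvMulAddMod (u v b d m : Int) (h : u % m = v % m) : (u * b + d) % m = (v * b + d) % m := by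
  rw [Int.add_emod, Int.mul_emod, h, ← Int.mul_emod, ← Int.add_emod]

lemma pvPrecompute (s : String) (b m : Int) (hm : 1 < m) :
    precompute_hashes s b m = (pvPH s.toList b m, pvPW b m s.toList.length) := by
  unfold precompute_hashes
  generalize s.toList = cs
  induction cs using List.reverseRecOn with
  | nil => simp [pvPH, pvPW, pvRawH, Int.emod_eq_of_lt (by omega : (0:Int) ≤ 1) hm]
  | append_singleton t c ih =>
    rw [List.foldl_append, ih, List.foldl_cons, List.foldl_nil]
    unfold pvPH pvPW
    simp only [List.length_append, List.length_singleton]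
    have hr : List.range (t.length + 1 + 1) = List.range (t.length + 1) ++ [t.length + 1] := List.range_succ
    rw [hr, List.map_append, List.map_append, List.map_singleton, List.map_singleton]
    have hlast1 : (List.map (fun i => pvRawH b (List.take i t) % m) (List.range (t.length + 1))).getLastD 0 = pvRawH b t % m := by
      rw [List.range_succ, List.map_append, List.map_singleton, List.getLastD_concat,
        List.take_of_length_le (le_refl _)]
    have hlast2 : (List.map (fun i => b ^ i % m) (List.range (t.length + 1))).getLastD 1 = b ^ t.length % m := by
      rw [List.range_succ, List.map_append, List.map_singleton, List.getLastD_concat]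
    refine Prod.ext ?_ ?_ <;> simp only
    · rw [hlast1]
      congr 1
      · refine List.map_congr_left (fun i hi => ?_)
        rw [List.take_append_of_le_length (by simpa using Nat.lt_succ_iff.mp (List.mem_range.mp hi))]
      · rw [PySem.Int.mod_eq_emod_of_pos (by omega)]
        rw [List.take_of_length_le (by simp), pvRawH_concat]
        exact List.singleton_inj.mpr (pvMulAddMod _ _ _ _ _ (pvEmodEmod _ _))
    · rw [hlast2]
      congr 1
      rw [PySem.Int.mod_eq_emod_of_pos (by omega), pow_succ]
      refine List.singleton_inj.mpr ?_
      have := pvMulAddMod (b ^ t.length % m) (b ^ t.length) b 0 m (pvEmodEmod _ _)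
      simpa using this

lemma pvModSub (X Y P W m : Int) (hXYW : X = Y * P + W) :
    (X % m - (Y % m * (P % m)) % m + m) % m = W % m := by
  have h1 : (X % m - (Y % m * (P % m)) % m) % m = (X - Y * P) % m := by
    conv_rhs => rw [Int.sub_emod, Int.mul_emod]
  rw [Int.add_emod_right, h1, hXYW]
  congr 1
  ring

lemma pvWinLength (cs : List Char) (k L : Nat) (h : k + L ≤ cs.length) :
    (pvWin cs k L).length = L := by
  unfold pvWin
  simp only [List.length_take, List.length_drop]
  omega

lemma pvSubhash (cs : List Char) (b m : Int) (hm : 1 < m) (i : Int) (L : Nat)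
    (h0 : 0 ≤ i) (hiL : i.toNat + L ≤ cs.length) :
    get_substring_hash (pvPH cs b m) (pvPW b m cs.length) i (i + (L : Int)) m
      = pvRawH b (pvWin cs i.toNat L) % m := by
  unfold get_substring_hash
  have hL0 : (0:Int) ≤ i + L := by omega
  have hsub : i + (L : Int) - i = (L : Int) := by ring
  rw [hsub]
  rw [PySem.List.pyGetD_of_nonneg _ _ hL0, PySem.List.pyGetD_of_nonneg _ _ h0,
    PySem.List.pyGetD_of_nonneg _ _ (by omega : (0:Int) ≤ (L:Int))]
  have htn : (i + (L:Int)).toNat = i.toNat + L := by omega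
  have htL : ((L:Int)).toNat = L := by omega
  rw [htn, htL]
  unfold pvPH pvPW
  rw [PySem.List.getD_map_range _ _ _ _ (by omega), PySem.List.getD_map_range _ _ _ _ (by omega),
    PySem.List.getD_map_range _ _ _ _ (by omega)]
  rw [PySem.Int.mod_eq_emod_of_pos (by omega), PySem.Int.mod_eq_emod_of_pos (by omega)]
  refine pvModSub _ _ _ _ _ ?_
  have htake : cs.take (i.toNat + L) = cs.take i.toNat ++ pvWin cs i.toNat L := List.take_add
  rw [htake, pvRawH_append, pvWinLength cs i.toNat L hiL]

lemma pvSubMod (X c P m : Int) : (X % m - c * (P % m)) % m = (X - c * P) % m := by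
  have h1 : (c * (P % m)) % m = (c * P) % m := by
    rw [Int.mul_emod, Int.emod_emod_of_dvd _ dvd_rfl, ← Int.mul_emod]
  rw [Int.sub_emod, Int.emod_emod_of_dvd _ dvd_rfl, h1, ← Int.sub_emod]

lemma pvModRoll (X c P M d b m : Int) (h : X = c * P + M) :
    ((X % m - c * (P % m)) * b + d) % m = (M * b + d) % m := by
  refine pvMulAddMod _ _ _ _ _ ?_
  rw [pvSubMod, h]
  congr 1
  ring

lemma pvRoll (cs : List Char) (b m : Int) (k L : Nat)
    (hk : 1 ≤ k) (hL : 1 ≤ L) (hkL : k + L ≤ cs.length) :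
    ((pvRawH b (pvWin cs (k - 1) L) % m - ((cs[k - 1]'(by omega)).toNat : Int) * (b ^ (L - 1) % m)) * b
        + ((cs[k + L - 1]'(by omega)).toNat : Int)) % m
      = pvRawH b (pvWin cs k L) % m := by
  obtain ⟨L', rfl⟩ : ∃ L', L = L' + 1 := ⟨L - 1, by omega⟩
  simp only [Nat.add_sub_cancel]
  have hmid : ((cs.drop k).take L').length = L' := by
    simp only [List.length_take, List.length_drop]; omega
  have h1 : pvWin cs (k - 1) (L' + 1) = cs[k - 1]'(by omega) :: (cs.drop k).take L' := by
    unfold pvWin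
    rw [List.drop_eq_getElem_cons (by omega : k - 1 < cs.length)]
    have hkk : k - 1 + 1 = k := by omega
    rw [hkk, List.take_succ_cons]
  have h2 : pvWin cs k (L' + 1) = (cs.drop k).take L' ++ [cs[k + (L' + 1) - 1]'(by omega)] := by
    unfold pvWin
    rw [List.take_add_one]
    congr 1
    rw [List.getElem?_drop]
    have hix : k + L' = k + (L' + 1) - 1 := by omega
    rw [List.getElem?_eq_getElem (by omega)]
    simp_rw [hix]
    rfl
  rw [h1, h2, pvRawH_cons, pvRawH_concat, hmid]
  exact pvModRoll _ _ _ _ _ _ _ rfl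

def pvStepS (cs : List Char) (L : Nat) (d : PySem.Dict (Int × Int) Int) (i : Int) :
    PySem.Dict (Int × Int) Int :=
  if (d.get? (pvKey cs L i.toNat)).isSome then d else d.insert (pvKey cs L i.toNat) i

lemma pvAfold (cs : List Char) (L : Nat) (hL : 1 ≤ L) (hLn : L ≤ cs.length) :
    ∀ (t : Nat) (j : Int) (d : PySem.Dict (Int × Int) Int),
      j = ((cs.length : Int) - L + 1) - t → 0 ≤ j →
      (∀ k v, d.get? k = some v → v < j) →
      (PySem.List.pyRange j ((cs.length : Int) - L + 1) 1).foldl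
        (fun d i =>
          let hash1 := get_substring_hash (pvPH cs 911 1000000007) (pvPW 911 1000000007 cs.length)
            i (i + (L : Int)) 1000000007
          let hash2 := get_substring_hash (pvPH cs 3571 1000000009) (pvPW 3571 1000000009 cs.length)
            i (i + (L : Int)) 1000000009
          let key := (hash1, hash2)
          match d.get? key with
          | none => d.insert key i
          | some v => if i < v then d.insert key i else d) d
      = (PySem.List.pyRange j ((cs.length : Int) - L + 1) 1).foldl (pvStepS cs L) d := by
  intro t
  induction t with
  | zero =>
    intro j d hj h0 hinv
    rw [PySem.List.pyRange_one_eq_nil (by omega)]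
    simp
  | succ t ih =>
    intro j d hj h0 hinv
    by_cases hjK : ((cs.length : Int) - L + 1) ≤ j
    · rw [PySem.List.pyRange_one_eq_nil hjK]
      simp
    · push_neg at hjK
      rw [PySem.List.pyRange_one_cons hjK]
      simp only [List.foldl_cons]
      have hjL : j.toNat + L ≤ cs.length := by omega
      have hk1 : get_substring_hash (pvPH cs 911 1000000007) (pvPW 911 1000000007 cs.length)
          j (j + (L : Int)) 1000000007 = (pvKey cs L j.toNat).1 :=
        pvSubhash cs 911 1000000007 (by omega) j L h0 hjL
      have hk2 : get_substring_hash (pvPH cs 3571 1000000009) (pvPW 3571 1000000009 cs.length)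
          j (j + (L : Int)) 1000000009 = (pvKey cs L j.toNat).2 :=
        pvSubhash cs 3571 1000000009 (by omega) j L h0 hjL
      have hkey : (get_substring_hash (pvPH cs 911 1000000007) (pvPW 911 1000000007 cs.length)
            j (j + (L : Int)) 1000000007,
          get_substring_hash (pvPH cs 3571 1000000009) (pvPW 3571 1000000009 cs.length)
            j (j + (L : Int)) 1000000009) = pvKey cs L j.toNat := by
        rw [hk1, hk2]
      simp only [hkey]
      cases hd : d.get? (pvKey cs L j.toNat) with
      | none =>
        simp only [pvStepS, hd, Option.isSome_none, Bool.false_eq_true, if_false]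
        refine ih (j + 1) _ (by omega) (by omega) ?_
        intro k v hv
        rw [PySem.Dict.get?_insert] at hv
        split_ifs at hv with hkk
        · injection hv with hvv; omega
        · exact lt_trans (hinv k v hv) (by omega)
      | some v =>
        have hnlt : ¬ j < v := by have := hinv _ _ hd; omega
        simp only [pvStepS, hd, Option.isSome_some, if_true, if_neg hnlt]
        refine ih (j + 1) _ (by omega) (by omega) ?_
        intro k w hw
        exact lt_trans (hinv k w hw) (by omega)

lemma pvBfold (cs : List Char) (L : Nat) (hL : 1 ≤ L) (hLn : L ≤ cs.length) :
    ∀ (t : Nat) (j : Int) (st : Int × Int × PySem.Dict (Int × Int) Int),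
      j = ((cs.length : Int) - L + 1) - t → 1 ≤ j →
      st.1 = (pvKey cs L (j - 1).toNat).1 → st.2.1 = (pvKey cs L (j - 1).toNat).2 →
      ((PySem.List.pyRange j ((cs.length : Int) - L + 1) 1).foldl
        (fun st i =>
          let h1 := PySem.Int.mod ((st.1 - ((PySem.List.pyGetD cs (i - 1) ' ').toNat : Int) *
              (911 ^ (L - 1) % 1000000007)) * 911 +
            ((PySem.List.pyGetD cs (i + (L : Int) - 1) ' ').toNat : Int)) 1000000007
          let h2 := PySem.Int.mod ((st.2.1 - ((PySem.List.pyGetD cs (i - 1) ' ').toNat : Int) *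
              (3571 ^ (L - 1) % 1000000009)) * 3571 +
            ((PySem.List.pyGetD cs (i + (L : Int) - 1) ' ').toNat : Int)) 1000000009
          let key := (h1, h2)
          if ((st.2.2).get? key).isSome then (h1, h2, st.2.2) else (h1, h2, (st.2.2).insert key i)) st).2.2
      = (PySem.List.pyRange j ((cs.length : Int) - L + 1) 1).foldl (pvStepS cs L) st.2.2 := by
  intro t
  induction t with
  | zero =>
    intro j st hj h1 _ _
    rw [PySem.List.pyRange_one_eq_nil (by omega)]
    simp
  | succ t ih =>
    intro j st hj hj1 hst1 hst2
    by_cases hjK : ((cs.length : Int) - L + 1) ≤ j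
    · rw [PySem.List.pyRange_one_eq_nil hjK]
      simp
    · push_neg at hjK
      obtain ⟨s1, s2, d⟩ := st
      simp only at hst1 hst2
      rw [PySem.List.pyRange_one_cons hjK]
      simp only [List.foldl_cons]
      have hjn : (j - 1).toNat = j.toNat - 1 := by omega
      have hjL : j.toNat + L ≤ cs.length := by omega
      have hco : PySem.List.pyGetD cs (j - 1) ' ' = cs[j.toNat - 1]'(by omega) := by
        rw [PySem.List.pyGetD_of_nonneg _ _ (by omega), hjn, List.getD_eq_getElem]
      have hcn : PySem.List.pyGetD cs (j + (L : Int) - 1) ' ' = cs[j.toNat + L - 1]'(by omega) := by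
        rw [PySem.List.pyGetD_of_nonneg _ _ (by omega)]
        have hix : (j + (L : Int) - 1).toNat = j.toNat + L - 1 := by omega
        rw [hix, List.getD_eq_getElem]
      have hs1' : s1 = pvRawH 911 (pvWin cs (j.toNat - 1) L) % 1000000007 := by
        rw [hst1, hjn]; rfl
      have hs2' : s2 = pvRawH 3571 (pvWin cs (j.toNat - 1) L) % 1000000009 := by
        rw [hst2, hjn]; rfl
      have hh1 : PySem.Int.mod ((s1 - ((PySem.List.pyGetD cs (j - 1) ' ').toNat : Int) *
            (911 ^ (L - 1) % 1000000007)) * 911 +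
          ((PySem.List.pyGetD cs (j + (L : Int) - 1) ' ').toNat : Int)) 1000000007
          = (pvKey cs L j.toNat).1 := by
        rw [PySem.Int.mod_eq_emod_of_pos (by omega), hco, hcn, hs1']
        exact pvRoll cs 911 1000000007 j.toNat L (by omega) hL hjL
      have hh2 : PySem.Int.mod ((s2 - ((PySem.List.pyGetD cs (j - 1) ' ').toNat : Int) *
            (3571 ^ (L - 1) % 1000000009)) * 3571 +
          ((PySem.List.pyGetD cs (j + (L : Int) - 1) ' ').toNat : Int)) 1000000009
          = (pvKey cs L j.toNat).2 := by
        rw [PySem.Int.mod_eq_emod_of_pos (by omega), hco, hcn, hs2']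
        exact pvRoll cs 3571 1000000009 j.toNat L (by omega) hL hjL
      simp only [hh1, hh2, Prod.mk.eta]
      by_cases hd : (d.get? (pvKey cs L j.toNat)).isSome
      · simp only [hd, if_true]
        rw [ih (j + 1) _ (by omega) (by omega) (by simp) (by simp)]
        simp only [pvStepS, hd, if_true]
      · simp only [hd, Bool.false_eq_true, if_false]
        rw [ih (j + 1) _ (by omega) (by omega) (by simp) (by simp)]
        simp only [pvStepS, hd, Bool.false_eq_true, if_false]

lemma pvFirst (cs : List Char) (b m : Int) (hm : 1 < m) (L : Nat) :
    pvFirstHash (PySem.List.slice cs none (some ((L : Nat) : Int))) b m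
      = pvRawH b (pvWin cs 0 L) % m := by
  rw [PySem.List.slice_to_natCast]
  unfold pvFirstHash pvWin
  simp only [List.drop_zero]
  have h := pvFoldMod b m (by omega) (cs.take L) 0
  rwa [Int.zero_emod] at h

lemma pvMain (s : String) (length : Int) (hpre : 0 ≤ length) :
    get_all_hashes s length = get_all_hashes_alt s length := by
  by_cases h0 : length = 0
  · subst h0
    simp [get_all_hashes, get_all_hashes_alt]
  · have hL1 : 1 ≤ length := by omega
    by_cases hn : (s.toList.length : Int) < length
    · have hK : (s.toList.length : Int) - length + 1 ≤ 0 := by omega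
      simp only [get_all_hashes, get_all_hashes_alt]
      rw [if_neg (by simp; omega), if_pos (by simp only [Bool.or_eq_true, decide_eq_true_eq]; omega)]
      rw [PySem.List.pyRange_one_eq_nil hK]
      simp
      rfl
    · push_neg at hn
      set cs := s.toList with hcs
      obtain ⟨L, hcast⟩ : ∃ L : Nat, length = (L : Int) := ⟨length.toNat, by omega⟩
      subst hcast
      have hL : 1 ≤ L := by omega
      have hLn : L ≤ cs.length := by exact_mod_cast hn
      have hKpos : (0 : Int) < (cs.length : Int) - L + 1 := by omega
      simp only [get_all_hashes, get_all_hashes_alt,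
        pvPrecompute s 911 1000000007 (by norm_num), pvPrecompute s 3571 1000000009 (by norm_num)]
      rw [if_neg (by simp; omega), if_neg (by simp only [Bool.or_eq_true, decide_eq_true_eq, ← hcs]; omega)]
      have hpow1 : PySem.Int.powMod 911 ((L : Int) - 1).toNat 1000000007
          = 911 ^ (L - 1) % 1000000007 := by
        unfold PySem.Int.powMod
        rw [PySem.Int.mod_eq_emod_of_pos (by norm_num)]
        have he : ((L : Int) - 1).toNat = L - 1 := by omega
        rw [he]
      have hpow2 : PySem.Int.powMod 3571 ((L : Int) - 1).toNat 1000000009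
          = 3571 ^ (L - 1) % 1000000009 := by
        unfold PySem.Int.powMod
        rw [PySem.Int.mod_eq_emod_of_pos (by norm_num)]
        have he : ((L : Int) - 1).toNat = L - 1 := by omega
        rw [he]
      rw [hpow1, hpow2, pvFirst cs 911 1000000007 (by norm_num) L,
        pvFirst cs 3571 1000000009 (by norm_num) L]
      -- A side: convert the fold to the common pvStepS fold
      rw [pvAfold cs L hL hLn ((cs.length : Int) - L + 1).toNat 0 PySem.Dict.empty (by omega)
        (by omega) (by intro k v hv; rw [PySem.Dict.get?_empty] at hv; exact absurd hv (by simp))]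
      -- B side: convert the rolling fold to the common pvStepS fold
      rw [pvBfold cs L hL hLn ((cs.length : Int) - L + 1 - 1).toNat 1 _ (by omega) (by omega)
        (by simp [pvKey]) (by simp [pvKey])]
      -- align the two pvStepS folds
      rw [PySem.List.pyRange_one_cons hKpos]
      simp only [List.foldl_cons]
      have hstep0 : pvStepS cs L PySem.Dict.empty 0
          = PySem.Dict.empty.insert (pvKey cs L 0) 0 := by
        simp [pvStepS]
      rw [hstep0]
      simp [pvKey]

-- ===== VERDICT (by name: the statement is the Claim_ definition above) =====
theorem get_all_hashes_spec : Claim_equal_get_all_hashes := by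
  intro s length _ hpre
  unfold Spec_get_all_hashes
  exact pvMain s length hpre
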